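-- pv_equiv track=rewrite | github.com/Razeer123/Advent-of-Code-2021 | code/code_day_03.py | find_common_index_in_row
-- ===== SOURCE A (Python) =====
-- def find_common_index_in_row(values, row_index, is_min=False):
--     ones = sum([1 for word in values if int(word[row_index]) == 1])
--     zeroes = sum([1 for word in values if int(word[row_index]) == 0])
--     new_values = []
--
--     if is_min:
--         if ones < zeroes:
--             for value in values:
--                 if value[row_index] == '1':
--                     new_values.append(value)
--         elif zeroes < ones:
--             for value in values:
--                 if value[row_index] == '0':
--                     new_values.append(value)
--         else:
--             for value in values:
--                 if value[row_index] == '0':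
--                     new_values.append(value)
--     else:
--         if ones > zeroes:
--             for value in values:
--                 if value[row_index] == '1':
--                     new_values.append(value)
--         elif zeroes > ones:
--             for value in values:
--                 if value[row_index] == '0':
--                     new_values.append(value)
--         else:
--             for value in values:
--                 if value[row_index] == '1':
--                     new_values.append(value)
--
--     return new_values
-- ===== SOURCE B (Python) =====
-- def find_common_index_in_row(values, row_index, is_min=False):
--     # Partition-and-select: one pass builds both candidate result lists
--     # (words with '0' / '1' at the position); then return the right bucket.
--     zeroes, ones = [], []
--     for v in values:
--         c = v[row_index]
--         if c == '0':
--             zeroes.append(v)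
--         elif c == '1':
--             ones.append(v)
--     if is_min:
--         return ones if len(ones) < len(zeroes) else zeroes
--     return ones if len(ones) >= len(zeroes) else zeroes
-- ===== Notes on version B (the rewrite author's own statement) =====
-- stated objective: simpler
-- what changed: A counts digits and then re-scans values with one of six duplicated filter loops; B partitions values into the two candidate output lists in a single pass and simply returns the majority/minority bucket, so no filtering pass exists at all.
import Mathlib
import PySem

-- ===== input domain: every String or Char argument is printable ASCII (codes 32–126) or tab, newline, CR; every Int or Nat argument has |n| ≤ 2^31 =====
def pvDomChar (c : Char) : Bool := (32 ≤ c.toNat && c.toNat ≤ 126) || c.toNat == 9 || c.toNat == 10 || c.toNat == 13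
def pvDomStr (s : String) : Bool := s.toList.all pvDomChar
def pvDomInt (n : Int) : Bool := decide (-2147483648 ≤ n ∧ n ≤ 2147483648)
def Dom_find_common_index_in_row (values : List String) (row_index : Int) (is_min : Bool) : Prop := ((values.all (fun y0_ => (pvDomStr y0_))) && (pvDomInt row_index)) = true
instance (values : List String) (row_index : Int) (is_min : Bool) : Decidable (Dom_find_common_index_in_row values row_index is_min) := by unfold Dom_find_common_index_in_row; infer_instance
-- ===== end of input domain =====

-- B replaces A's count-then-refilter scheme (two counting comprehensions and six
-- duplicated filter loops) by one partition pass that builds both candidate output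
-- lists and then just returns the selected bucket (objective: simpler).


-- ===== PORT A =====
-- int(word[row_index]) : Option Int (none = IndexError or ValueError; Pre_ excludes those)
def pvDigitAt (w : String) (i : Int) : Option Int :=
  (PySem.Str.pyGet? w i).bind (fun c => PySem.Int.ofChars? [c])

def find_common_index_in_row (values : List String) (row_index : Int) (is_min : Bool) : List String :=
  let ones : Int := ((values.filter (fun word => pvDigitAt word row_index = some 1)).length : Int)
  let zeroes : Int := ((values.filter (fun word => pvDigitAt word row_index = some 0)).length : Int)
  if is_min then
    if ones < zeroes then
      values.filter (fun v => PySem.Str.pyGet? v row_index = some '1')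
    else if zeroes < ones then
      values.filter (fun v => PySem.Str.pyGet? v row_index = some '0')
    else
      values.filter (fun v => PySem.Str.pyGet? v row_index = some '0')
  else
    if ones > zeroes then
      values.filter (fun v => PySem.Str.pyGet? v row_index = some '1')
    else if zeroes > ones then
      values.filter (fun v => PySem.Str.pyGet? v row_index = some '0')
    else
      values.filter (fun v => PySem.Str.pyGet? v row_index = some '1')

-- ===== PORT B =====
-- one pass: partition values into the '0'-bucket and the '1'-bucket, then select
def find_common_index_in_row_alt (values : List String) (row_index : Int) (is_min : Bool) : List String :=
  let buckets : List String × List String := values.foldl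
    (fun p v =>
      match PySem.Str.pyGet? v row_index with   -- c = v[row_index]
      | none => p                               -- (unreachable under Pre_)
      | some c =>
        if c = '0' then (p.1 ++ [v], p.2)
        else if c = '1' then (p.1, p.2 ++ [v])
        else p)
    ([], [])
  let zeroes := buckets.1
  let ones := buckets.2
  if is_min then (if ones.length < zeroes.length then ones else zeroes)
  else (if ones.length ≥ zeroes.length then ones else zeroes)

-- ===== PRECONDITION & SPEC =====
-- Pre_ excludes exactly the inputs where Python A raises: some word has no character at
-- row_index (IndexError) or a non-digit one there, on which int() raises ValueError.
def Pre_find_common_index_in_row (values : List String) (row_index : Int) (is_min : Bool) : Prop :=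
  values.all (fun w => ((PySem.Str.pyGet? w row_index).map Char.isDigit).getD false) = true
instance (values : List String) (row_index : Int) (is_min : Bool) : Decidable (Pre_find_common_index_in_row values row_index is_min) := by unfold Pre_find_common_index_in_row; infer_instance

def pvWitness_find_common_index_in_row : List String × Int × Bool := (["01", "10", "11"], 0, false)

def Spec_find_common_index_in_row (values : List String) (row_index : Int) (is_min : Bool) (out : List String) : Prop := out = find_common_index_in_row_alt values row_index is_min
instance (values : List String) (row_index : Int) (is_min : Bool) (out : List String) : Decidable (Spec_find_common_index_in_row values row_index is_min out) := by unfold Spec_find_common_index_in_row; infer_instance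

-- ===== CLAIM (what is proved, stated in full; the proofs are below) =====
def Claim_equal_find_common_index_in_row : Prop := ∀ (values : List String) (row_index : Int) (is_min : Bool), Dom_find_common_index_in_row values row_index is_min → Pre_find_common_index_in_row values row_index is_min → Spec_find_common_index_in_row values row_index is_min (find_common_index_in_row values row_index is_min)

-- ===== LEMMAS AND PROOFS =====
-- A digit character is one of the ten literal digits.
theorem pv_digit_cases (c : Char) (h : c.isDigit = true) :
    c = '0' ∨ c = '1' ∨ c = '2' ∨ c = '3' ∨ c = '4' ∨
    c = '5' ∨ c = '6' ∨ c = '7' ∨ c = '8' ∨ c = '9' := by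
  have hb : '0' ≤ c ∧ c ≤ '9' := by
    simpa [Char.isDigit, decide_eq_true_eq] using h
  have hn : 48 ≤ c.toNat ∧ c.toNat ≤ 57 := by
    exact ⟨hb.1, hb.2⟩
  have hval : c.toNat = 48 ∨ c.toNat = 49 ∨ c.toNat = 50 ∨ c.toNat = 51 ∨ c.toNat = 52 ∨
      c.toNat = 53 ∨ c.toNat = 54 ∨ c.toNat = 55 ∨ c.toNat = 56 ∨ c.toNat = 57 := by omega
  have heq : ∀ n : Nat, c.toNat = n → ∀ d : Char, d.toNat = n → c = d := by
    intro n h1 d h2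
    apply Char.ext
    apply UInt32.toNat_inj.mp
    show c.toNat = d.toNat
    omega
  rcases hval with h' | h' | h' | h' | h' | h' | h' | h' | h' | h' <;>
    [exact Or.inl (heq _ h' '0' rfl);
     exact Or.inr (Or.inl (heq _ h' '1' rfl));
     exact Or.inr (Or.inr (Or.inl (heq _ h' '2' rfl)));
     exact Or.inr (Or.inr (Or.inr (Or.inl (heq _ h' '3' rfl))));
     exact Or.inr (Or.inr (Or.inr (Or.inr (Or.inl (heq _ h' '4' rfl)))));
     exact Or.inr (Or.inr (Or.inr (Or.inr (Or.inr (Or.inl (heq _ h' '5' rfl))))));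
     exact Or.inr (Or.inr (Or.inr (Or.inr (Or.inr (Or.inr (Or.inl (heq _ h' '6' rfl)))))));
     exact Or.inr (Or.inr (Or.inr (Or.inr (Or.inr (Or.inr (Or.inr (Or.inl (heq _ h' '7' rfl))))))));
     exact Or.inr (Or.inr (Or.inr (Or.inr (Or.inr (Or.inr (Or.inr (Or.inr (Or.inl (heq _ h' '8' rfl)))))))));
     exact Or.inr (Or.inr (Or.inr (Or.inr (Or.inr (Or.inr (Or.inr (Or.inr (Or.inr (heq _ h' '9' rfl)))))))))]

-- For a digit char, int(c) = 1 iff c = '1', and = 0 iff c = '0'.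
theorem pv_ofChars_one (c : Char) (h : c.isDigit = true) :
    (PySem.Int.ofChars? [c] = some 1) = (c = '1') := by
  rcases pv_digit_cases c h with h' | h' | h' | h' | h' | h' | h' | h' | h' | h' <;> subst h' <;> decide

theorem pv_ofChars_zero (c : Char) (h : c.isDigit = true) :
    (PySem.Int.ofChars? [c] = some 0) = (c = '0') := by
  rcases pv_digit_cases c h with h' | h' | h' | h' | h' | h' | h' | h' | h' | h' <;> subst h' <;> decide

-- B's partition fold builds exactly the two filtered bucket lists
-- (stated for an arbitrary character lookup g).
theorem pv_fold_buckets (g : String → Option Char) (values : List String) (z o : List String) :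
    values.foldl
      (fun p v =>
        match g v with
        | none => p
        | some c =>
          if c = '0' then (p.1 ++ [v], p.2)
          else if c = '1' then (p.1, p.2 ++ [v])
          else p) (z, o)
    = (z ++ values.filter (fun v => g v = some '0'),
       o ++ values.filter (fun v => g v = some '1')) := by
  induction values generalizing z o with
  | nil => simp
  | cons v vs ih =>
    simp only [List.foldl_cons, List.filter_cons]
    rcases h : g v with _ | c
    · simp [h, ih]
    · by_cases h0 : c = '0'
      · subst h0; simp [h, ih]
      · by_cases h1 : c = '1'
        · subst h1; simp [h, ih]
        · have e0 : g v ≠ some '0' := by simp [h, h0]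
          have e1 : g v ≠ some '1' := by simp [h, h1]
          simp [h, h0, h1, ih, e0, e1]

-- Under Pre_, A's int-based counting predicate coincides with char comparison.
theorem pv_filter_digit (values : List String) (i : Int)
    (hp : values.all (fun w => ((PySem.Str.pyGet? w i).map Char.isDigit).getD false) = true)
    (d : Int) (ch : Char)
    (hdc : ∀ c : Char, c.isDigit = true → (PySem.Int.ofChars? [c] = some d) = (c = ch)) :
    values.filter (fun w => pvDigitAt w i = some d)
      = values.filter (fun w => PySem.Str.pyGet? w i = some ch) := by
  apply List.filter_congr
  intro w hw
  have hd : ((PySem.Str.pyGet? w i).map Char.isDigit).getD false = true := by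
    have := List.all_eq_true.mp hp w hw
    simpa using this
  rcases h : PySem.Str.pyGet? w i with _ | c
  · rw [h] at hd; simp at hd
  · rw [h] at hd
    simp only [Option.map_some, Option.getD_some] at hd
    have hthis := hdc c hd
    simp only [pvDigitAt, PySem.Str.pyGet?] at h ⊢
    have h' : PySem.List.pyGet? w.toList i = some c := h
    simp [h', hthis]

-- ===== VERDICT (by name: the statement is the Claim_ definition above) =====
theorem find_common_index_in_row_spec : Claim_equal_find_common_index_in_row := by
  intro values row_index is_min _ hp
  unfold Spec_find_common_index_in_row find_common_index_in_row find_common_index_in_row_alt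
  rw [pv_fold_buckets]
  rw [pv_filter_digit values row_index hp 1 '1' pv_ofChars_one,
      pv_filter_digit values row_index hp 0 '0' pv_ofChars_zero]
  set f1 := values.filter (fun v => PySem.Str.pyGet? v row_index = some '1') with hf1
  set f0 := values.filter (fun v => PySem.Str.pyGet? v row_index = some '0') with hf0
  simp only [List.nil_append]
  cases is_min with
  | true =>
    by_cases h : (f1.length : Int) < (f0.length : Int)
    · have h' : f1.length < f0.length := by exact_mod_cast h
      simp [h, h']
    · have h' : ¬ f1.length < f0.length := by exact_mod_cast h
      by_cases h2 : (f0.length : Int) < (f1.length : Int) <;> simp [h, h', h2]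
  | false =>
    by_cases h : (f1.length : Int) > (f0.length : Int)
    · have h' : f1.length ≥ f0.length := by omega
      simp [h, h']
    · by_cases h2 : (f0.length : Int) > (f1.length : Int)
      · have h' : ¬ f1.length ≥ f0.length := by omega
        simp [h, h2, h']
      · have h' : f1.length ≥ f0.length := by omega
        simp [h, h2, h']
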